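-- pv_equiv track=rewrite | github.com/zhoueth1/APS106 | Week 8/lab6.py | identify_unbalanced_atoms
-- ===== SOURCE A (Python) =====
-- def identify_unbalanced_atoms(reactant_atoms, product_atoms):
--     """
--     (Dict,Dict) -> Set
--
--     Identify the elements that are not balanced between two dictionaries
--     that represent two sides of a chemical equation.
--
--     Parameters
--     ----------
--     reactant_atoms : Dict
--         A dictionary containing the elements and the number of atoms of
--         each element on the reactant side of a chemical equation.
--     product_atoms : Dict
--         A dictionary containing the elements and the number of atoms of
--         each element on the product side of a chemical equation.
--
--     Returns
--     -------
--     Set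
--         A set containing all the elements that are not balanced between
--         the two dictionaries.
--
--
--     Examples
--     --------
--     >>> find_unbalanced_atoms({"H" : 2, "Cl" : 2, "Na" : 2}, {"H" : 2, "Na" : 1, "Cl" : 2})
--     {'Na'}
--
--     >>> find_unbalanced_atoms({"H" : 2, "Cl" : 2, "Na" : 2}, {"H" : 2, "Na" : 2, "Cl" : 2})
--     set()
--
--     >>> find_unbalanced_atoms({"H" : 2, "Cl" : 2, "Na" : 2}, {"H" : 2, "F" : 2, "Cl" : 2})
--     {'F', 'Na'}
--     """
--     ## To Do: Complete the function
--     result = set()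
--
--     #gotta find keys of both sets
--
--     for key in reactant_atoms:
--         if key not in product_atoms or (reactant_atoms[key] != product_atoms[key]):
--             result.add(key)
--
--     for key in product_atoms:
--         if key not in reactant_atoms:
--             result.add(key)
--
--     return result if len(result) > 0 else set()
-- ===== SOURCE B (Python) =====
-- def identify_unbalanced_atoms(reactant_atoms, product_atoms):
--     diff = set(reactant_atoms.items()) ^ set(product_atoms.items())
--     return {key for key, _ in diff}
-- ===== Notes on version B (the rewrite author's own statement) =====
-- stated objective: simpler
-- what changed: Replaces the two explicit membership-test loops with a single set-algebra expression: symmetric difference of the two dicts' item sets, projected to keys.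
import Mathlib
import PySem

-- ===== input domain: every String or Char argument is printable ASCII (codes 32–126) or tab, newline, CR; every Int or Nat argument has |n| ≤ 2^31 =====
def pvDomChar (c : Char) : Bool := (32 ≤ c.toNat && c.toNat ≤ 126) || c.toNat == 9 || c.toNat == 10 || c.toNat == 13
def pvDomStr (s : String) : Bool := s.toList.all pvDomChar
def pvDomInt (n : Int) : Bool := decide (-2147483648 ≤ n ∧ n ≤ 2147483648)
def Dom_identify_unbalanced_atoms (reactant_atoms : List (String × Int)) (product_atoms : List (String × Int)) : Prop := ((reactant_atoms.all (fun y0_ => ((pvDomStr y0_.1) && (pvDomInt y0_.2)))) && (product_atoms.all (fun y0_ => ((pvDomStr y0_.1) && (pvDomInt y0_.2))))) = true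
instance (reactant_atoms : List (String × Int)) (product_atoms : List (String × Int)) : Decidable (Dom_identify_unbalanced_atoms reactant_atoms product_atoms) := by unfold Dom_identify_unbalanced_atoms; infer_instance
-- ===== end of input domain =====

-- B replaces A's two membership-test loops by one set-algebra expression (symmetric
-- difference of the item sets, projected to keys); objective: simpler, same cost.


-- ===== PORT A =====
-- 'key not in product_atoms or reactant_atoms[key] != product_atoms[key]' is ported with
-- total get? lookups (key is always present in its own dict, so Python's [] cannot raise).
def identify_unbalanced_atoms (reactant_atoms : List (String × Int)) (product_atoms : List (String × Int)) : List String :=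
  let dR : PySem.Dict String Int := PySem.Dict.mk reactant_atoms
  let dP : PySem.Dict String Int := PySem.Dict.mk product_atoms
  let result : PySem.Set String :=
    dR.keys.foldl (fun res key =>
      if dP.contains key = false ∨ dR.get? key ≠ dP.get? key then PySem.Set.add res key
      else res) PySem.Set.empty
  let result : PySem.Set String :=
    dP.keys.foldl (fun res key =>
      if dR.contains key = false then PySem.Set.add res key else res) result
  if result.length > 0 then result else PySem.Set.empty

-- ===== PORT B =====
def identify_unbalanced_atoms_alt (reactant_atoms : List (String × Int)) (product_atoms : List (String × Int)) : List String :=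
  let diff : PySem.Set (String × Int) :=
    PySem.Set.symmDiff (PySem.Set.ofList (PySem.Dict.mk reactant_atoms : PySem.Dict String Int).items)
                       (PySem.Set.ofList (PySem.Dict.mk product_atoms : PySem.Dict String Int).items)
  PySem.Set.ofList (diff.map Prod.fst)

-- ===== PRECONDITION & SPEC =====
-- Pre_ requires pairwise-distinct keys in each association list: a Python dict cannot
-- contain a duplicate key, so only such lists represent the function's dict arguments.
def Pre_identify_unbalanced_atoms (reactant_atoms : List (String × Int)) (product_atoms : List (String × Int)) : Prop :=
  (reactant_atoms.map Prod.fst).Nodup ∧ (product_atoms.map Prod.fst).Nodup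
instance (reactant_atoms : List (String × Int)) (product_atoms : List (String × Int)) : Decidable (Pre_identify_unbalanced_atoms reactant_atoms product_atoms) := by unfold Pre_identify_unbalanced_atoms; infer_instance

def pvWitness_identify_unbalanced_atoms : (List (String × Int)) × (List (String × Int)) :=
  ([("H", 2), ("Cl", 2), ("Na", 2)], [("H", 2), ("Na", 1), ("Cl", 2)])

def Spec_identify_unbalanced_atoms (reactant_atoms : List (String × Int)) (product_atoms : List (String × Int)) (out : List String) : Prop := out = identify_unbalanced_atoms_alt reactant_atoms product_atoms
instance (reactant_atoms : List (String × Int)) (product_atoms : List (String × Int)) (out : List String) : Decidable (Spec_identify_unbalanced_atoms reactant_atoms product_atoms out) := by unfold Spec_identify_unbalanced_atoms; infer_instance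

-- ===== CLAIM (what is proved, stated in full; the proofs are below) =====
def Claim_equal_identify_unbalanced_atoms : Prop := ∀ (reactant_atoms : List (String × Int)) (product_atoms : List (String × Int)), Dom_identify_unbalanced_atoms reactant_atoms product_atoms → Pre_identify_unbalanced_atoms reactant_atoms product_atoms → Spec_identify_unbalanced_atoms reactant_atoms product_atoms (identify_unbalanced_atoms reactant_atoms product_atoms)

-- ===== LEMMAS AND PROOFS =====

lemma set_update_eq_append_filter {α : Type} [BEq α] [LawfulBEq α]
    (xs : List α) (h1 : xs.Nodup) (s : List α) :
    PySem.Set.update s xs = s ++ xs.filter (fun x => !s.contains x) := by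
  induction xs generalizing s with
  | nil => simp [PySem.Set.update]
  | cons x xs ih =>
    have hx : x ∉ xs := (List.nodup_cons.mp h1).1
    have hxs : xs.Nodup := (List.nodup_cons.mp h1).2
    by_cases h : x ∈ s
    · have hc : s.contains x = true := by simp [List.contains_eq_mem, h]
      have hadd : PySem.Set.add s x = s := by
        simp [PySem.Set.add, PySem.Set.contains, h]
      simp only [PySem.Set.update, List.foldl_cons, hadd, List.filter_cons, hc,
        Bool.not_true]
      exact ih hxs s
    · have hc : s.contains x = false := by simp [List.contains_eq_mem, h]
      have hadd : PySem.Set.add s x = s ++ [x] := by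
        simp [PySem.Set.add, PySem.Set.contains, h]
      simp only [PySem.Set.update, List.foldl_cons, hadd, List.filter_cons, hc,
        Bool.not_false]
      have := ih hxs (s ++ [x])
      simp only [PySem.Set.update] at this
      rw [this]
      have hfe : xs.filter (fun y => !(s ++ [x]).contains y) = xs.filter (fun y => !s.contains y) := by
        apply List.filter_congr
        intro y hy
        have hyx : y ≠ x := fun e => hx (e ▸ hy)
        simp [List.contains_eq_mem, hyx]
      rw [hfe]
      simp

lemma set_ofList_of_nodup {α : Type} [BEq α] [LawfulBEq α]
    (xs : List α) (h1 : xs.Nodup) : PySem.Set.ofList xs = xs := by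
  have := set_update_eq_append_filter xs h1 []
  simpa [PySem.Set.update, PySem.Set.ofList, PySem.Set.empty] using this

theorem ports_agree (r p : List (String × Int))
    (hr : (r.map Prod.fst).Nodup) (hp : (p.map Prod.fst).Nodup) :
    identify_unbalanced_atoms r p = identify_unbalanced_atoms_alt r p := by
  have hrn : r.Nodup := hr.of_map
  have hpn : p.Nodup := hp.of_map
  set dR : PySem.Dict String Int := PySem.Dict.mk r with hdR
  set dP : PySem.Dict String Int := PySem.Dict.mk p with hdP
  have hkR : dR.keys = r.map Prod.fst := rfl
  have hkP : dP.keys = p.map Prod.fst := rfl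
  have hRkey : dR.keys.Nodup := hr
  have hPkey : dP.keys.Nodup := hp
  -- abbreviations
  set c : String → Bool := fun k => decide (dP.contains k = false ∨ dR.get? k ≠ dP.get? k) with hc
  set cM : String → Bool := fun k => decide (dR.contains k = false) with hcM
  set K1 : List String := (r.map Prod.fst).filter c with hK1
  set M0 : List String := (p.map Prod.fst).filter cM with hM0
  have hK1nd : K1.Nodup := hr.filter _
  have hM0nd : M0.Nodup := hp.filter _
  -- ===== A side =====
  have hA : identify_unbalanced_atoms r p = K1 ++ M0 := by
    unfold identify_unbalanced_atoms
    show (if List.length (List.foldl (fun res key => if dR.contains key = false then PySem.Set.add res key else res)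
        (List.foldl (fun res key => if dP.contains key = false ∨ dR.get? key ≠ dP.get? key then PySem.Set.add res key else res) PySem.Set.empty dR.keys) dP.keys) > 0
        then _ else PySem.Set.empty) = K1 ++ M0
    rw [PySem.List.foldl_ite_eq_foldl_filter
      (p := fun key => dP.contains key = false ∨ dR.get? key ≠ dP.get? key) (f := PySem.Set.add)]
    rw [PySem.List.foldl_ite_eq_foldl_filter
      (p := fun key => dR.contains key = false) (f := PySem.Set.add)]
    have e1 : dR.keys.filter (fun x => decide (dP.contains x = false ∨ dR.get? x ≠ dP.get? x)) = K1 := by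
      rw [hK1, hc, hkR]
    have e2 : dP.keys.filter (fun x => decide (dR.contains x = false)) = M0 := by
      rw [hM0, hcM, hkP]
    rw [e1, e2]
    have h2 : List.foldl PySem.Set.add K1 M0 = K1 ++ M0 := by
      have : List.foldl PySem.Set.add K1 M0 = PySem.Set.update K1 M0 := rfl
      rw [this, set_update_eq_append_filter _ hM0nd]
      congr 1
      apply List.filter_eq_self.mpr
      intro k hk
      have hkM : cM k = true := (List.mem_filter.mp hk).2
      have hnr : k ∉ r.map Prod.fst := by
        intro hmem
        have : dR.contains k = true := by
          rw [PySem.Dict.contains_iff_mem_keys]; exact hmem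
        simp [hcM, this] at hkM
      have : k ∉ K1 := fun hK => hnr (List.mem_filter.mp hK).1
      simp [List.contains_eq_mem, this]
    have h1 : List.foldl PySem.Set.add PySem.Set.empty K1 = K1 := set_ofList_of_nodup _ hK1nd
    rw [h1, h2]
    cases hl : K1 ++ M0 with
    | nil => simp [PySem.Set.empty]
    | cons a t => simp
  -- ===== B side =====
  have hgetR : ∀ k v, (k, v) ∈ r → dR.get? k = some v :=
    fun k v h => PySem.Dict.get?_of_mem_items dR h hRkey
  have hgetP : ∀ k v, (k, v) ∈ p → dP.get? k = some v :=
    fun k v h => PySem.Dict.get?_of_mem_items dP h hPkey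
  set q1 : String × Int → Bool := fun pr => !p.contains pr with hq1
  set q2 : String × Int → Bool := fun pr => !r.contains pr with hq2
  have hB : identify_unbalanced_atoms_alt r p = K1 ++ M0 := by
    unfold identify_unbalanced_atoms_alt
    show PySem.Set.ofList ((PySem.Set.symmDiff (PySem.Set.ofList r) (PySem.Set.ofList p)).map Prod.fst) = K1 ++ M0
    rw [set_ofList_of_nodup r hrn, set_ofList_of_nodup p hpn]
    show PySem.Set.ofList ((r.filter q1 ++ p.filter q2).map Prod.fst) = K1 ++ M0
    rw [List.map_append]
    have hsplit : PySem.Set.ofList ((r.filter q1).map Prod.fst ++ (p.filter q2).map Prod.fst)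
        = PySem.Set.update (PySem.Set.ofList ((r.filter q1).map Prod.fst)) ((p.filter q2).map Prod.fst) := by
      simp [PySem.Set.ofList, PySem.Set.update, List.foldl_append]
    rw [hsplit]
    have hA1nd : ((r.filter q1).map Prod.fst).Nodup :=
      hr.sublist (List.Sublist.map Prod.fst List.filter_sublist)
    have hA2nd : ((p.filter q2).map Prod.fst).Nodup :=
      hp.sublist (List.Sublist.map Prod.fst List.filter_sublist)
    rw [set_ofList_of_nodup _ hA1nd, set_update_eq_append_filter _ hA2nd]
    -- E1 : first block equals K1
    have hE1 : (r.filter q1).map Prod.fst = K1 := by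
      rw [hK1, List.filter_map]
      congr 1
      apply List.filter_congr
      rintro ⟨k, v⟩ hpr
      have hgr : dR.get? k = some v := hgetR _ _ hpr
      by_cases hm : (k, v) ∈ p
      · have hgp : dP.get? k = some v := hgetP _ _ hm
        have hcont : dP.contains k = true := by
          rw [PySem.Dict.contains_eq_isSome_get?, hgp]; rfl
        simp [hq1, hc, List.contains_eq_mem, hm, hcont, hgr, hgp]
      · by_cases hct : dP.contains k = true
        · obtain ⟨w, hw⟩ : ∃ w, dP.get? k = some w := by
            rw [PySem.Dict.contains_eq_isSome_get?] at hct
            exact Option.isSome_iff_exists.mp hct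
          have hwv : v ≠ w := by
            intro e
            exact hm (e ▸ PySem.Dict.mem_items_of_get?_eq_some _ hw)
          simp [hq1, hc, List.contains_eq_mem, hm, hgr, hw, hwv, hct]
        · have hcf : dP.contains k = false := by simpa using hct
          simp [hq1, hc, List.contains_eq_mem, hm, hcf]
    rw [hE1]
    -- E2 : second block equals M0
    congr 1
    have hstep : ((p.filter q2).map Prod.fst).filter (fun k => !K1.contains k)
        = (p.filter (fun pr => ((fun k => !K1.contains k) ∘ Prod.fst) pr && q2 pr)).map Prod.fst := by
      rw [List.filter_map, List.filter_filter]
    rw [hstep, hM0, List.filter_map]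
    congr 1
    apply List.filter_congr
    rintro ⟨k, v⟩ hpr
    have hgp : dP.get? k = some v := hgetP _ _ hpr
    by_cases hct : dR.contains k = true
    · have hRHS : cM k = false := by simp [hcM, hct]
      obtain ⟨w, hw⟩ : ∃ w, dR.get? k = some w := by
        rw [PySem.Dict.contains_eq_isSome_get?] at hct
        exact Option.isSome_iff_exists.mp hct
      by_cases hwv : w = v
      · have hmem : (k, v) ∈ r := PySem.Dict.mem_items_of_get?_eq_some _ (hwv ▸ hw)
        simp [hq2, hRHS, List.contains_eq_mem, hmem]
      · have hkK1 : k ∈ K1 := by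
          rw [hK1]
          apply List.mem_filter.mpr
          refine ⟨?_, ?_⟩
          · rw [← hkR, ← PySem.Dict.contains_iff_mem_keys]; exact hct
          · simp [hc, hw, hgp, hwv]
        simp [hRHS, List.contains_eq_mem, hkK1]
    · have hcf : dR.contains k = false := by simpa using hct
      have hnk : k ∉ r.map Prod.fst := by
        intro hmem
        rw [← hkR, ← PySem.Dict.contains_iff_mem_keys] at hmem
        exact hct hmem
      have hnm : (k, v) ∉ r := fun h => hnk (List.mem_map_of_mem h)
      have hnK1 : k ∉ K1 := fun hK => hnk (List.mem_filter.mp hK).1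
      simp [hq2, hcM, hcf, List.contains_eq_mem, hnm, hnK1]
  rw [hA, hB]

-- ===== VERDICT (by name: the statement is the Claim_ definition above) =====
theorem identify_unbalanced_atoms_spec : Claim_equal_identify_unbalanced_atoms := by
  intro reactant_atoms product_atoms _ hpre
  exact ports_agree reactant_atoms product_atoms hpre.1 hpre.2
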